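-- pv_equiv track=rewrite | github.com/JGCdev/gta-fivem-texture-optimizer | rebuild_ytd.py | calculate_rsc7_flags
-- ===== SOURCE A (Python) =====
-- def calculate_rsc7_flags(virtual_size, physical_size):
--     """
--     Calcula los flags RSC7 para los tamaños dados.
--
--     Para tamaños típicos en YTD:
--     - Virtual (estructuras): 0x2000 (8KB)
--     - Physical (texturas): variable según tamaño de textura
--     """
--
--     def encode_size_to_flags(size):
--         """Codifica un tamaño a flags RSC7."""
--         if size == 0:
--             return 0
--
--         # Encontrar el shift base (potencia de 2 más cercana después de 4KB)
--         # El tamaño base es 0x1000 << base_shift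
--         page_size = 0x1000  # 4KB
--
--         # Calcular cuántas páginas necesitamos
--         pages_needed = (size + page_size - 1) // page_size
--
--         # Encontrar base_shift tal que (1 << base_shift) <= pages_needed
--         base_shift = 0
--         while (1 << (base_shift + 1)) <= pages_needed:
--             base_shift += 1
--
--         base_pages = 1 << base_shift
--         extra_pages = pages_needed - base_pages
--
--         # Codificar extra_pages como (mult + 1) << shift - 1 = extra_pages
--         # Para simplicidad, usar shift=0, mult=extra_pages
--         mult = extra_pages
--         shift = 0
--
--         # Si mult > 127, necesitamos usar shift
--         while mult > 127:
--             shift += 1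
--             mult = (extra_pages >> shift)
--
--         # Construir flags
--         # bits 4-7: base_shift
--         # bits 17-23: mult
--         # bits 24-27: shift
--         flags = (base_shift << 4) | (mult << 17) | (shift << 24)
--
--         return flags
--
--     flags0 = encode_size_to_flags(virtual_size)
--     flags1 = encode_size_to_flags(physical_size)
--
--     # Añadir marcadores típicos
--     # bit 7 = 1 indica que hay datos físicos
--     if physical_size > 0:
--         flags1 |= 0x80
--
--     return flags0, flags1
-- ===== SOURCE B (Python) =====
-- def calculate_rsc7_flags(virtual_size, physical_size):
--     def encode(size):
--         if size == 0:
--             return 0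
--         pages = (size + 0xFFF) // 0x1000
--         base_shift = pages.bit_length() - 1 if pages > 0 else 0
--         extra = pages - (1 << base_shift)
--         if extra > 127:
--             shift = extra.bit_length() - 7
--             mult = extra >> shift
--         else:
--             shift, mult = 0, extra
--         return (base_shift << 4) | (mult << 17) | (shift << 24)
--
--     flags0 = encode(virtual_size)
--     flags1 = encode(physical_size)
--     if physical_size > 0:
--         flags1 |= 0x80
--     return flags0, flags1
-- ===== Notes on version B (the rewrite author's own statement) =====
-- stated objective: simpler
-- what changed: Both of A's while-loops are replaced by closed-form bit_length arithmetic: base_shift = pages.bit_length()-1 for positive page counts, and (shift, mult) = (extra.bit_length()-7, extra >> shift) when extra > 127; the flag assembly and the physical-data marker are unchanged.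
import Mathlib
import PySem

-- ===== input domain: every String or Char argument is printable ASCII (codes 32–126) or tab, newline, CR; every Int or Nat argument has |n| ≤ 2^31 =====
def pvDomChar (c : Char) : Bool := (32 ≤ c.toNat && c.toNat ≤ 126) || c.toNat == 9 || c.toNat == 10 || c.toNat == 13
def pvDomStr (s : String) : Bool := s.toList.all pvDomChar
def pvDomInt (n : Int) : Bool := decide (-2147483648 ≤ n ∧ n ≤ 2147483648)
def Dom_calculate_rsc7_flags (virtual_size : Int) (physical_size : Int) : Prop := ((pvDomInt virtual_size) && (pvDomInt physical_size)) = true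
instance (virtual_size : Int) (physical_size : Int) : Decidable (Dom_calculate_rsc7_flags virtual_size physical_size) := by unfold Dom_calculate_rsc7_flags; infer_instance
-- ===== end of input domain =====

-- B replaces A's two while-loops by closed bit_length formulas (simpler; same O(1)-per-call flag assembly).

-- ===== PORT A =====
-- while (1 << (base_shift + 1)) <= pages_needed: base_shift += 1
def pvALoop1 (pages : Int) (bs : Nat) : Nat :=
  if (1 : Int) <<< (bs + 1) ≤ pages then pvALoop1 pages (bs + 1) else bs
termination_by pages.toNat - 2 ^ bs
decreasing_by
  have h2 : ((2 ^ (bs + 1) : Nat) : Int) ≤ pages := by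
    have := ‹(1 : Int) <<< (bs + 1) ≤ pages›
    rw [Int.shiftLeft_eq] at this
    push_cast
    linarith
  have h3 : 2 ^ (bs + 1) ≤ pages.toNat := by omega
  have h4 : 2 ^ bs < 2 ^ (bs + 1) := Nat.pow_lt_pow_right (by norm_num) (by omega)
  omega

-- while mult > 127: shift += 1; mult = extra >> shift   (invariant mult = extra >> shift, shift starts at 0)
def pvALoop2 (extra : Int) (shift : Nat) : Int × Nat :=
  if 127 < extra >>> shift then pvALoop2 extra (shift + 1) else (extra >>> shift, shift)
termination_by extra.toNat >>> shift
decreasing_by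
  rename_i h
  rcases extra with n | n
  · rw [show (Int.ofNat n) >>> shift = ((n >>> shift : Nat) : Int) from rfl] at h
    show n >>> (shift + 1) < n >>> shift
    have hd : n >>> (shift + 1) = n >>> shift / 2 := by
      rw [Nat.shiftRight_eq_div_pow, Nat.shiftRight_eq_div_pow, pow_succ, ← Nat.div_div_eq_div_mul]
    omega
  · exfalso
    rw [show (Int.negSucc n) >>> shift = Int.negSucc (n >>> shift) from rfl] at h
    have := Int.negSucc_lt_zero (n >>> shift)
    omega

def pvEncA (size : Int) : Int :=
  if size = 0 then 0
  else
    let page_size : Int := 0x1000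
    let pages_needed := PySem.Int.floordiv (size + page_size - 1) page_size
    let base_shift := pvALoop1 pages_needed 0
    let base_pages : Int := (1 : Int) <<< base_shift
    let extra_pages := pages_needed - base_pages
    let ms := pvALoop2 extra_pages 0
    PySem.Int.bor (PySem.Int.bor ((base_shift : Int) <<< 4) (ms.1 <<< 17)) ((ms.2 : Int) <<< 24)

def calculate_rsc7_flags (virtual_size : Int) (physical_size : Int) : Int × Int :=
  let flags0 := pvEncA virtual_size
  let flags1 := pvEncA physical_size
  let flags1 := if 0 < physical_size then PySem.Int.bor flags1 0x80 else flags1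
  (flags0, flags1)

-- ===== PORT B =====
def pvEncB (size : Int) : Int :=
  if size = 0 then 0
  else
    let pages := PySem.Int.floordiv (size + 0xFFF) 0x1000
    let base_shift : Nat := if 0 < pages then PySem.Int.bitLength pages - 1 else 0
    let extra := pages - (1 : Int) <<< base_shift
    let sm : Nat × Int :=
      if 127 < extra then
        (PySem.Int.bitLength extra - 7, extra >>> (PySem.Int.bitLength extra - 7))
      else (0, extra)
    PySem.Int.bor (PySem.Int.bor ((base_shift : Int) <<< 4) (sm.2 <<< 17)) ((sm.1 : Int) <<< 24)

def calculate_rsc7_flags_alt (virtual_size : Int) (physical_size : Int) : Int × Int :=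
  let flags0 := pvEncB virtual_size
  let flags1 := pvEncB physical_size
  let flags1 := if 0 < physical_size then PySem.Int.bor flags1 0x80 else flags1
  (flags0, flags1)

-- ===== PRECONDITION & SPEC =====
def Spec_calculate_rsc7_flags (virtual_size : Int) (physical_size : Int) (out : Int × Int) : Prop := out = calculate_rsc7_flags_alt virtual_size physical_size
instance (virtual_size : Int) (physical_size : Int) (out : Int × Int) : Decidable (Spec_calculate_rsc7_flags virtual_size physical_size out) := by unfold Spec_calculate_rsc7_flags; infer_instance

-- ===== CLAIM (what is proved, stated in full; the proofs are below) =====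
def Claim_equal_calculate_rsc7_flags : Prop := ∀ (virtual_size : Int) (physical_size : Int), Dom_calculate_rsc7_flags virtual_size physical_size → Spec_calculate_rsc7_flags virtual_size physical_size (calculate_rsc7_flags virtual_size physical_size)

-- ===== LEMMAS AND PROOFS =====

theorem pvOneShl (k : Nat) : (1 : Int) <<< k = ((2 ^ k : Nat) : Int) := by
  rw [Int.shiftLeft_eq]; push_cast; ring

theorem pvShrNat (n s : Nat) : ((n : Int)) >>> s = ((n >>> s : Nat) : Int) := rfl

theorem pvLoop1_nonpos (pages : Int) (h : pages ≤ 0) : pvALoop1 pages 0 = 0 := by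
  have hc : ¬ ((1 : Int) <<< ((0 : Nat) + 1) ≤ pages) := by
    rw [pvOneShl]
    have : (1 : Nat) ≤ 2 ^ ((0 : Nat) + 1) := Nat.one_le_two_pow
    intro hle
    have : ((1 : Nat) : Int) ≤ pages := le_trans (by exact_mod_cast this) hle
    omega
  rw [pvALoop1, if_neg hc]

theorem pvLoop1_pos (pages : Int) (hp : 0 < pages) :
    ∀ k bs, PySem.Int.bitLength pages - bs ≤ k → 2 ^ bs ≤ pages.natAbs →
      pvALoop1 pages bs = PySem.Int.bitLength pages - 1 := by
  have hpn : ((pages.natAbs : Nat) : Int) = pages := Int.natAbs_of_nonneg (le_of_lt hp)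
  have h1 : 2 ^ (PySem.Int.bitLength pages - 1) ≤ pages.natAbs :=
    PySem.Int.two_pow_bitLength_le pages (by omega)
  have h2 : pages.natAbs < 2 ^ PySem.Int.bitLength pages :=
    PySem.Int.lt_two_pow_bitLength pages
  intro k
  induction k with
  | zero =>
    intro bs hk hbs
    exfalso
    have hlt : 2 ^ bs < 2 ^ PySem.Int.bitLength pages := by omega
    have := (Nat.pow_lt_pow_iff_right (a := 2) (by norm_num)).mp hlt
    omega
  | succ k ih =>
    intro bs hk hbs
    rw [pvALoop1]
    by_cases hc : (1 : Int) <<< (bs + 1) ≤ pages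
    · rw [if_pos hc]
      have hcn : 2 ^ (bs + 1) ≤ pages.natAbs := by
        rw [pvOneShl, ← hpn] at hc
        exact_mod_cast hc
      have hblt : bs + 1 < PySem.Int.bitLength pages := by
        have hlt : 2 ^ (bs + 1) < 2 ^ PySem.Int.bitLength pages := by omega
        exact (Nat.pow_lt_pow_iff_right (a := 2) (by norm_num)).mp hlt
      exact ih (bs + 1) (by omega) hcn
    · rw [if_neg hc]
      have hcn : pages.natAbs < 2 ^ (bs + 1) := by
        rw [pvOneShl, ← hpn] at hc
        have hc2 : ¬ ((2 ^ (bs + 1) : Nat) ≤ pages.natAbs) := fun hle => hc (by exact_mod_cast hle)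
        omega
      have hA : bs < PySem.Int.bitLength pages := by
        have hlt : 2 ^ bs < 2 ^ PySem.Int.bitLength pages := by omega
        exact (Nat.pow_lt_pow_iff_right (a := 2) (by norm_num)).mp hlt
      have hB : PySem.Int.bitLength pages - 1 < bs + 1 := by
        have hlt : 2 ^ (PySem.Int.bitLength pages - 1) < 2 ^ (bs + 1) := by omega
        exact (Nat.pow_lt_pow_iff_right (a := 2) (by norm_num)).mp hlt
      omega

theorem pvLoop2_small (extra : Int) (h : ¬ 127 < extra) : pvALoop2 extra 0 = (extra, 0) := by
  have h0 : extra >>> (0 : Nat) = extra := by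
    rcases extra with n | n
    · rfl
    · rfl
  rw [pvALoop2, h0, if_neg h]

theorem pvLoop2_cond (n s : Nat) (h1 : 2 ^ (PySem.Int.bitLength (n : Int) - 1) ≤ n)
    (h2 : n < 2 ^ PySem.Int.bitLength (n : Int)) :
    (127 < n >>> s ↔ s + 7 < PySem.Int.bitLength (n : Int)) := by
  rw [Nat.shiftRight_eq_div_pow]
  have hpow : 0 < 2 ^ s := Nat.two_pow_pos s
  have hps : (2 : Nat) ^ (s + 7) = 128 * 2 ^ s := by ring
  constructor
  · intro h
    have hm : 128 * 2 ^ s ≤ n := by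
      have := (Nat.le_div_iff_mul_le hpow).mp (by omega : 128 ≤ n / 2 ^ s)
      omega
    have hlt : 2 ^ (s + 7) < 2 ^ PySem.Int.bitLength (n : Int) := by omega
    exact (Nat.pow_lt_pow_iff_right (a := 2) (by norm_num)).mp hlt
  · intro h
    have hle : 2 ^ (s + 7) ≤ 2 ^ (PySem.Int.bitLength (n : Int) - 1) :=
      Nat.pow_le_pow_right (by norm_num) (by omega)
    have := (Nat.le_div_iff_mul_le hpow).mpr (by omega : 128 * 2 ^ s ≤ n)
    omega

theorem pvLoop2_big_nat (n : Nat) (hn : 127 < n) :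
    ∀ k s, PySem.Int.bitLength (n : Int) - 7 - s ≤ k → s ≤ PySem.Int.bitLength (n : Int) - 7 →
      pvALoop2 (n : Int) s =
        ((n : Int) >>> (PySem.Int.bitLength (n : Int) - 7), PySem.Int.bitLength (n : Int) - 7) := by
  have h1 : 2 ^ (PySem.Int.bitLength (n : Int) - 1) ≤ n := by
    have := PySem.Int.two_pow_bitLength_le (n : Int) (by exact_mod_cast by omega)
    simpa using this
  have h2 : n < 2 ^ PySem.Int.bitLength (n : Int) := by
    have := PySem.Int.lt_two_pow_bitLength (n : Int)
    simpa using this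
  have hbl : 7 < PySem.Int.bitLength (n : Int) := by
    have h128 : (2 : Nat) ^ 7 = 128 := by norm_num
    have hlt : 2 ^ 7 < 2 ^ PySem.Int.bitLength (n : Int) := by omega
    exact (Nat.pow_lt_pow_iff_right (a := 2) (by norm_num)).mp hlt
  intro k
  induction k with
  | zero =>
    intro s hk hs
    have hseq : s = PySem.Int.bitLength (n : Int) - 7 := by omega
    subst hseq
    have hcond : ¬ (127 < (n : Int) >>> (PySem.Int.bitLength (n : Int) - 7)) := by
      rw [pvShrNat]
      intro hc
      have hc' : 127 < n >>> (PySem.Int.bitLength (n : Int) - 7) := by exact_mod_cast hc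
      have := (pvLoop2_cond n _ h1 h2).mp hc'
      omega
    rw [pvALoop2, if_neg hcond]
  | succ k ih =>
    intro s hk hs
    rw [pvALoop2]
    by_cases hc : 127 < (n : Int) >>> s
    · rw [if_pos hc]
      have hc' : 127 < n >>> s := by rw [pvShrNat] at hc; exact_mod_cast hc
      have hlt := (pvLoop2_cond n s h1 h2).mp hc'
      exact ih (s + 1) (by omega) (by omega)
    · rw [if_neg hc]
      have hge : ¬ (s + 7 < PySem.Int.bitLength (n : Int)) := by
        intro hlt
        apply hc
        rw [pvShrNat]
        exact_mod_cast (pvLoop2_cond n s h1 h2).mpr hlt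
      have hseq : s = PySem.Int.bitLength (n : Int) - 7 := by omega
      rw [hseq]

theorem pvLoop2_big (extra : Int) (h : 127 < extra) :
    pvALoop2 extra 0 =
      (extra >>> (PySem.Int.bitLength extra - 7), PySem.Int.bitLength extra - 7) := by
  have hnn : 0 ≤ extra := by omega
  obtain ⟨n, rfl⟩ := Int.eq_ofNat_of_zero_le hnn
  have hn : 127 < n := by exact_mod_cast h
  exact pvLoop2_big_nat n hn (PySem.Int.bitLength (n : Int) - 7) 0 (by omega) (by omega)

theorem pvEnc_eq (size : Int) : pvEncA size = pvEncB size := by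
  unfold pvEncA pvEncB
  by_cases h0 : size = 0
  · simp [h0]
  · simp only [h0, if_false]
    have hpg : size + 0x1000 - 1 = size + 0xFFF := by ring
    rw [hpg]
    set pages := PySem.Int.floordiv (size + 0xFFF) 0x1000 with hpages
    by_cases hp : 0 < pages
    · have hbs : pvALoop1 pages 0 = PySem.Int.bitLength pages - 1 := by
        apply pvLoop1_pos pages hp (PySem.Int.bitLength pages) 0 (by omega)
        have hne : pages.natAbs ≠ 0 := by omega
        simpa using Nat.one_le_iff_ne_zero.mpr hne
      simp only [hp, if_true, hbs]
      set extra := pages - (1 : Int) <<< (PySem.Int.bitLength pages - 1) with hextra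
      by_cases he : 127 < extra
      · rw [pvLoop2_big extra he]
        simp [he]
      · rw [pvLoop2_small extra he]
        simp [he]
    · have hbs : pvALoop1 pages 0 = 0 := pvLoop1_nonpos pages (by omega)
      simp only [hp, if_false, hbs]
      set extra := pages - (1 : Int) <<< (0 : Nat) with hextra
      have he : ¬ 127 < extra := by
        have h1 : (1 : Int) <<< (0 : Nat) = 1 := rfl
        rw [hextra, h1]; omega
      rw [pvLoop2_small extra he]
      simp [he]

-- ===== VERDICT (by name: the statement is the Claim_ definition above) =====
theorem calculate_rsc7_flags_spec : Claim_equal_calculate_rsc7_flags := by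
  intro v p _
  unfold Spec_calculate_rsc7_flags calculate_rsc7_flags calculate_rsc7_flags_alt
  simp [pvEnc_eq]
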